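-- pv_equiv track=rewrite | github.com/JeongGod/Algo-study | 3people/3week/p81302.py | bfs
-- ===== SOURCE A (Python) =====
-- from collections import deque
--
-- def bfs(p):
--   start = []
--   for i in range(5):
--     for j in range(5):
--       if p[i][j] == 'P':
--         start.append([i, j])
--   for s in start:
--     deq = deque([s])
--     visited = [[0]*5 for _ in range(5)]
--     dist = [[0]*5 for _ in range(5)]
--     visited[s[0]][s[1]] = 1
--
--     while deq:
--       x, y = deq.popleft()
--       dx = [-1, 1, 0, 0]
--       dy = [0, 0, -1, 1]
--
--       for i in range(4):
--         nx = x + dx[i]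
--         ny = y + dy[i]
--
--         if 0 <= nx < 5 and 0 <= ny < 5 and visited[nx][ny] == 0:
--           if p[nx][ny] == 'O':
--             deq.append([nx, ny])
--             visited[nx][ny] = 1
--             dist[nx][ny] = dist[x][y] + 1
--           if p[nx][ny] == 'P' and dist[x][y] <= 1:
--             return 0
--   return 1
-- ===== SOURCE B (Python) =====
-- # Direct bounded scan instead of BFS: for each 'P', look at its orthogonal
-- # neighbors; a 'P' neighbor, or an 'O' neighbor having a 'P' neighbor other
-- # than the starting cell, means two people within distance 2.
-- def bfs(p):
--   def sides(i, j):
--     return ((i - 1, j), (i + 1, j), (i, j - 1), (i, j + 1))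
--
--   def inb(i, j):
--     return 0 <= i < 5 and 0 <= j < 5
--
--   def near(i, j):
--     for ni, nj in sides(i, j):
--       if inb(ni, nj):
--         c = p[ni][nj]
--         if c == 'P':
--           return True
--         if c == 'O' and any(inb(mi, mj) and (mi, mj) != (i, j) and p[mi][mj] == 'P'
--                             for mi, mj in sides(ni, nj)):
--           return True
--     return False
--
--   found = any(p[i][j] == 'P' and near(i, j) for i in range(5) for j in range(5))
--   return 0 if found else 1
-- ===== Notes on version B (the rewrite author's own statement) =====
-- stated objective: simpler
-- what changed: Replaced the per-'P' BFS with deque, visited and dist grids by a direct bounded scan: for each 'P' cell check its four in-bounds neighbors, and for an 'O' neighbor check that cell's neighbors for a 'P' other than the start; no queue or auxiliary grids are kept.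
import Mathlib
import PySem

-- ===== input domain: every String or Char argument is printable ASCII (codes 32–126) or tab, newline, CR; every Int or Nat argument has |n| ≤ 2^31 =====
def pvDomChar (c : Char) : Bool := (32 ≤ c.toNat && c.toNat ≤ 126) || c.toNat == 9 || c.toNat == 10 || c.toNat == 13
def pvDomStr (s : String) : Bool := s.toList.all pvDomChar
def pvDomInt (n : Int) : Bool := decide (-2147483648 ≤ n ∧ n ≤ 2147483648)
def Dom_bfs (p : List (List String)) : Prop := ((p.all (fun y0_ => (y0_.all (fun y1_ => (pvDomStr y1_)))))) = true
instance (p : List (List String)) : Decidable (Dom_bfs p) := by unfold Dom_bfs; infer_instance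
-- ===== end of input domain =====

-- B replaces A's per-'P' BFS (deque + visited + dist grids) by a direct bounded
-- scan of each 'P' cell's neighbors and neighbors-of-'O'-neighbors; same return value.

-- ===== PORT A =====
-- p[x][y] as an Option (none = out of range; all uses are guarded in-bounds or excluded by Pre_)
def pvCell (p : List (List String)) (x y : Int) : Option String :=
  (PySem.List.pyGet? p x).bind (fun r => PySem.List.pyGet? r y)

-- grid[x][y] read / write for the 5×5 int grids (visited, dist); every use is
-- guarded by 0 ≤ x < 5 ∧ 0 ≤ y < 5 on a 5×5 grid, where these are Python-exact
def pvG (g : List (List Int)) (x y : Int) : Int :=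
  PySem.List.pyGetD (PySem.List.pyGetD g x []) y 1

def pvS (g : List (List Int)) (x y v : Int) : List (List Int) :=
  PySem.List.pySetD g x (PySem.List.pySetD (PySem.List.pyGetD g x []) y v)

-- the four (dx, dy) offsets, in A's order
def pvNbrs : List (Int × Int) := [(-1, 0), (1, 0), (0, -1), (0, 1)]

-- number of zero entries of a grid (termination measure only)
def pvZeros (g : List (List Int)) : Nat := (g.map (fun r => r.count 0)).sum

-- body of A's inner `for i in range(4)` loop; .error 0 = A's `return 0`
def pvStepA (p : List (List String)) (x y : Int)
    (σ : List (Int × Int) × List (List Int) × List (List Int)) (δ : Int × Int) :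
    Except Int (List (Int × Int) × List (List Int) × List (List Int)) :=
  let nx := x + δ.1
  let ny := y + δ.2
  if 0 ≤ nx ∧ nx < 5 ∧ 0 ≤ ny ∧ ny < 5 ∧ pvG σ.2.1 nx ny = 0 then
    let σ' :=
      if pvCell p nx ny = some "O" then
        (σ.1 ++ [(nx, ny)], pvS σ.2.1 nx ny 1, pvS σ.2.2 nx ny (pvG σ.2.2 x y + 1))
      else σ
    if pvCell p nx ny = some "P" ∧ pvG σ'.2.2 x y ≤ 1 then .error 0
    else .ok σ'
  else .ok σ

theorem pvCount_set (r : List Int) (k : Nat) (h : r[k]? = some 0) :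
    (r.set k 1).count 0 + 1 = r.count 0 := by
  induction r generalizing k with
  | nil => simp at h
  | cons a r ih =>
    cases k with
    | zero => simp_all
    | succ k =>
      simp only [List.getElem?_cons_succ] at h
      simp only [List.set_cons_succ, List.count_cons]
      have := ih k h
      omega

theorem pvSum_set_lt (l : List Nat) (k : Nat) (v : Nat) (hk : k < l.length)
    (hv : v < l[k]) : (l.set k v).sum < l.sum := by
  induction l generalizing k with
  | nil => simp at hk
  | cons a l ih =>
    cases k with
    | zero => simp_all
    | succ k =>
      simp only [List.set_cons_succ, List.sum_cons]
      have := ih k (by simpa using hk) (by simpa using hv)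
      omega

theorem pvZeros_pvS (g : List (List Int)) (x y : Int) (hx : 0 ≤ x) (hy : 0 ≤ y)
    (h0 : pvG g x y = 0) : pvZeros (pvS g x y 1) < pvZeros g := by
  unfold pvG at h0
  unfold pvS pvZeros
  rw [PySem.List.pyGetD_of_nonneg _ _ hx, PySem.List.pyGetD_of_nonneg _ _ hy] at h0
  rw [PySem.List.pyGetD_of_nonneg _ _ hx, PySem.List.pySetD_of_nonneg _ _ hx,
    PySem.List.pySetD_of_nonneg _ _ hy]
  by_cases hgx : x.toNat < g.length
  · have hr : g.getD x.toNat [] = g[x.toNat] := List.getD_eq_getElem g [] hgx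
    rw [hr] at h0 ⊢
    by_cases hry : y.toNat < g[x.toNat].length
    · have h00 : g[x.toNat][y.toNat] = 0 := by
        rw [List.getD_eq_getElem _ _ hry] at h0; exact h0
      have hcnt := pvCount_set g[x.toNat] y.toNat
        (by rw [List.getElem?_eq_getElem hry, h00])
      rw [List.map_set]
      refine pvSum_set_lt _ _ _ (by simpa using hgx) ?_
      simp only [List.getElem_map]
      omega
    · rw [List.getD_eq_default _ _ (by omega)] at h0
      norm_num at h0
  · rw [List.getD_eq_default (l := g) _ (by omega)] at h0
    simp at h0

theorem pvStepA_meas (p : List (List String)) (x y : Int)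
    (σ σ' : List (Int × Int) × List (List Int) × List (List Int)) (δ : Int × Int)
    (h : pvStepA p x y σ δ = .ok σ') :
    σ'.1.length + pvZeros σ'.2.1 ≤ σ.1.length + pvZeros σ.2.1 := by
  simp only [pvStepA] at h
  split_ifs at h with h1 h2 h3
  all_goals cases h
  all_goals try omega
  · obtain ⟨ha, hb, hc, hd, he⟩ := h1
    have := pvZeros_pvS σ.2.1 (x + δ.1) (y + δ.2) (by omega) (by omega) he
    simp only [List.length_append, List.length_cons, List.length_nil]
    omega

theorem pvFoldA_meas (p : List (List String)) (x y : Int)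
    (l : List (Int × Int)) (σ σ' : List (Int × Int) × List (List Int) × List (List Int))
    (h : List.foldlM (pvStepA p x y) σ l = .ok σ') :
    σ'.1.length + pvZeros σ'.2.1 ≤ σ.1.length + pvZeros σ.2.1 := by
  induction l generalizing σ with
  | nil =>
    simp only [List.foldlM_nil, pure, Except.pure] at h
    cases h; omega
  | cons a l ih =>
    rw [List.foldlM_cons] at h
    cases hs : pvStepA p x y σ a with
    | error e => rw [hs] at h; simp only [bind, Except.bind] at h; simp at h
    | ok σ1 =>
      rw [hs] at h; simp only [bind, Except.bind] at h
      exact le_trans (ih σ1 h) (pvStepA_meas p x y σ σ1 a hs)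

-- A's `while deq:` loop; none = fall through, some r = `return r`
def bfsLoop (p : List (List String)) (deq : List (Int × Int))
    (visited dist : List (List Int)) : Option Int :=
  match deq with
  | [] => none
  | (x, y) :: rest =>
    match hf : List.foldlM (pvStepA p x y) (rest, visited, dist) pvNbrs with
    | .error r => some r
    | .ok (deq', vis', dist') => bfsLoop p deq' vis' dist'
termination_by deq.length + pvZeros visited
decreasing_by
  have := pvFoldA_meas p x y pvNbrs _ _ hf
  simp at this ⊢
  omega

-- A's start-collection double loop
def pvStarts (p : List (List String)) : List (Int × Int) :=
  (PySem.List.pyRange 0 5 1).foldl (fun acc i =>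
    (PySem.List.pyRange 0 5 1).foldl (fun acc2 j =>
      if pvCell p i j = some "P" then acc2 ++ [(i, j)] else acc2) acc) []

def pvInit : List (List Int) := List.replicate 5 (List.replicate 5 0)

-- A's `for s in start:` loop with its early `return 0`
def pvRunStarts (p : List (List String)) : List (Int × Int) → Int
  | [] => 1
  | s :: rest =>
    match bfsLoop p [s] (pvS pvInit s.1 s.2 1) pvInit with
    | some r => r
    | none => pvRunStarts p rest

def bfs (p : List (List String)) : Int := pvRunStarts p (pvStarts p)

-- ===== PORT B =====
-- the four orthogonal neighbours of a cell, in B's order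
def pvSides (c : Int × Int) : List (Int × Int) :=
  [(c.1 - 1, c.2), (c.1 + 1, c.2), (c.1, c.2 - 1), (c.1, c.2 + 1)]

def pvInb (c : Int × Int) : Bool :=
  decide (0 ≤ c.1 ∧ c.1 < 5 ∧ 0 ≤ c.2 ∧ c.2 < 5)

-- B's `near(i, j)`
def pvNear (p : List (List String)) (i j : Int) : Bool :=
  (pvSides (i, j)).any (fun n =>
    pvInb n &&
      (decide (pvCell p n.1 n.2 = some "P") ||
       (decide (pvCell p n.1 n.2 = some "O") &&
        (pvSides n).any (fun m =>
          pvInb m && decide (m ≠ (i, j)) && decide (pvCell p m.1 m.2 = some "P")))))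

def bfs_alt (p : List (List String)) : Int :=
  if (PySem.List.pyRange 0 5 1).any (fun i =>
       (PySem.List.pyRange 0 5 1).any (fun j =>
         decide (pvCell p i j = some "P") && pvNear p i j)) then 0 else 1

-- ===== PRECONDITION & SPEC =====
-- Pre_ excludes exactly the grids on which the Python A raises IndexError:
-- those with fewer than 5 rows, or one of the first 5 rows shorter than 5.
def Pre_bfs (p : List (List String)) : Prop :=
  5 ≤ p.length ∧ ∀ r ∈ p.take 5, 5 ≤ r.length
instance (p : List (List String)) : Decidable (Pre_bfs p) := by unfold Pre_bfs; infer_instance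

def pvWitness_bfs : List (List String) :=
  [["P", "O", ".", ".", "."], [".", ".", "P", ".", "."], [".", ".", ".", ".", "."],
   [".", ".", ".", ".", "."], [".", ".", ".", ".", "."]]

def Spec_bfs (p : List (List String)) (out : Int) : Prop := out = bfs_alt p
instance (p : List (List String)) (out : Int) : Decidable (Spec_bfs p out) := by unfold Spec_bfs; infer_instance

-- ===== CLAIM (what is proved, stated in full; the proofs are below) =====
def Claim_equal_bfs : Prop := ∀ (p : List (List String)), Dom_bfs p → Pre_bfs p → Spec_bfs p (bfs p)

-- ===== LEMMAS AND PROOFS =====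

-- Prop-level views of the cell predicates
def pvInbP (c : Int × Int) : Prop := 0 ≤ c.1 ∧ c.1 < 5 ∧ 0 ≤ c.2 ∧ c.2 < 5
def pvIsP (p : List (List String)) (c : Int × Int) : Prop := pvCell p c.1 c.2 = some "P"
def pvIsO (p : List (List String)) (c : Int × Int) : Prop := pvCell p c.1 c.2 = some "O"
-- a 5×5 grid shape (visited / dist always have it)
def pvSh5 (g : List (List Int)) : Prop := g.length = 5 ∧ ∀ r ∈ g, r.length = 5
-- only the start s and 'O' cells ever get marked visited
def pvVisInv (p : List (List String)) (s : Int × Int) (vis : List (List Int)) : Prop :=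
  ∀ c : Int × Int, pvInbP c → pvG vis c.1 c.2 ≠ 0 → c = s ∨ pvIsO p c
-- c has an in-bounds 'P' neighbour other than the start s
def pvHit (p : List (List String)) (s c : Int × Int) : Prop :=
  ∃ n ∈ pvSides c, pvInbP n ∧ pvIsP p n ∧ n ≠ s

theorem pvNotPO (p : List (List String)) (c : Int × Int) (h : pvIsP p c) : ¬ pvIsO p c := by
  unfold pvIsP at h; unfold pvIsO; rw [h]; simp

theorem pvSides_ne (c n : Int × Int) (h : n ∈ pvSides c) : n ≠ c := by
  simp only [pvSides, List.mem_cons, List.not_mem_nil, or_false] at h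
  rcases h with h | h | h | h <;> subst h <;> simp [Prod.ext_iff]

theorem pvMem_sides (x y : Int) (n : Int × Int) :
    n ∈ pvSides (x, y) ↔ ∃ δ ∈ pvNbrs, n = (x + δ.1, y + δ.2) := by
  simp only [pvSides, pvNbrs, List.mem_cons, List.not_mem_nil, or_false]
  constructor
  · rintro (rfl | rfl | rfl | rfl)
    · exact ⟨(-1, 0), Or.inl rfl, by simp [Prod.ext_iff]; omega⟩
    · exact ⟨(1, 0), Or.inr (Or.inl rfl), by simp⟩
    · exact ⟨(0, -1), Or.inr (Or.inr (Or.inl rfl)), by simp [Prod.ext_iff]; omega⟩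
    · exact ⟨(0, 1), Or.inr (Or.inr (Or.inr rfl)), by simp⟩
  · rintro ⟨δ, (rfl | rfl | rfl | rfl), rfl⟩ <;> simp [Prod.ext_iff] <;> omega

-- grid read/write lemmas on 5×5 grids with in-bounds indices
theorem pvSh5_init : pvSh5 pvInit := by unfold pvSh5 pvInit; refine ⟨by simp, ?_⟩; intro r hr; simp_all

theorem pvRowLen (g : List (List Int)) (h : pvSh5 g) (k : Nat) (hk : k < g.length) :
    (g.getD k []).length = 5 := by
  rw [List.getD_eq_getElem _ _ hk]
  exact h.2 _ (List.getElem_mem _)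

theorem pvSh5_pvS (g : List (List Int)) (x y v : Int) (h : pvSh5 g)
    (hx : 0 ≤ x ∧ x < 5) (hy : 0 ≤ y ∧ y < 5) : pvSh5 (pvS g x y v) := by
  have h1 := h.1
  unfold pvS
  rw [PySem.List.pySetD_of_nonneg _ _ hx.1, PySem.List.pySetD_of_nonneg _ _ hy.1,
    PySem.List.pyGetD_of_nonneg _ _ hx.1]
  refine ⟨by rw [List.length_set]; exact h1, ?_⟩
  intro r hmem
  rcases List.mem_or_eq_of_mem_set hmem with hm | hm
  · exact h.2 r hm
  · subst hm
    rw [List.length_set]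
    exact pvRowLen g h x.toNat (by omega)

theorem pvG_eq_getD (g : List (List Int)) (x y : Int) (hx : 0 ≤ x) (hy : 0 ≤ y) :
    pvG g x y = (g.getD x.toNat []).getD y.toNat 1 := by
  unfold pvG
  rw [PySem.List.pyGetD_of_nonneg _ _ hx, PySem.List.pyGetD_of_nonneg _ _ hy]

theorem pvS_eq_set (g : List (List Int)) (x y v : Int) (hx : 0 ≤ x) (hy : 0 ≤ y) :
    pvS g x y v = g.set x.toNat ((g.getD x.toNat []).set y.toNat v) := by
  unfold pvS
  rw [PySem.List.pySetD_of_nonneg _ _ hx, PySem.List.pySetD_of_nonneg _ _ hy,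
    PySem.List.pyGetD_of_nonneg _ _ hx]

theorem pvGetD_set_same {α : Type} (l : List α) (k : Nat) (a d : α) (h : k < l.length) :
    (l.set k a).getD k d = a := by
  rw [List.getD_eq_getElem _ _ (by rw [List.length_set]; exact h)]
  exact List.getElem_set_self _

theorem pvGetD_set_ne {α : Type} (l : List α) (k k' : Nat) (a d : α) (h : k ≠ k') :
    (l.set k a).getD k' d = l.getD k' d := by
  by_cases hk : k' < l.length
  · rw [List.getD_eq_getElem _ _ (by rw [List.length_set]; exact hk),
      List.getD_eq_getElem _ _ hk]
    exact List.getElem_set_ne h _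
  · rw [List.getD_eq_default _ _ (by rw [List.length_set]; omega),
      List.getD_eq_default _ _ (by omega)]

theorem pvG_pvS_same (g : List (List Int)) (x y v : Int) (h : pvSh5 g)
    (hx : 0 ≤ x ∧ x < 5) (hy : 0 ≤ y ∧ y < 5) : pvG (pvS g x y v) x y = v := by
  have h1 := h.1
  have hxl : x.toNat < g.length := by omega
  have hyl : y.toNat < (g.getD x.toNat []).length := by rw [pvRowLen g h _ hxl]; omega
  rw [pvG_eq_getD _ _ _ hx.1 hy.1, pvS_eq_set _ _ _ _ hx.1 hy.1,
    pvGetD_set_same _ _ _ _ hxl, pvGetD_set_same _ _ _ _ hyl]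

theorem pvG_pvS_ne (g : List (List Int)) (x y v x' y' : Int) (h : pvSh5 g)
    (hx : 0 ≤ x ∧ x < 5) (hy : 0 ≤ y ∧ y < 5)
    (hx' : 0 ≤ x' ∧ x' < 5) (hy' : 0 ≤ y' ∧ y' < 5)
    (hne : (x', y') ≠ (x, y)) : pvG (pvS g x y v) x' y' = pvG g x' y' := by
  have h1 := h.1
  have hxl : x.toNat < g.length := by omega
  rw [pvG_eq_getD _ _ _ hx'.1 hy'.1, pvG_eq_getD _ _ _ hx'.1 hy'.1,
    pvS_eq_set _ _ _ _ hx.1 hy.1]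
  by_cases hxx : x'.toNat = x.toNat
  · have hyy : y.toNat ≠ y'.toNat := by
      intro hyy
      exact hne (by simp [Prod.ext_iff]; omega)
    rw [hxx, pvGetD_set_same _ _ _ _ hxl, pvGetD_set_ne _ _ _ _ _ hyy]
  · rw [pvGetD_set_ne _ _ _ _ _ (fun hh => hxx hh.symm)]

theorem pvG_init (x y : Int) (hx : 0 ≤ x ∧ x < 5) (hy : 0 ≤ y ∧ y < 5) :
    pvG pvInit x y = 0 := by
  rw [pvG_eq_getD _ _ _ hx.1 hy.1]
  unfold pvInit
  have e1 : (List.replicate 5 (List.replicate 5 (0:Int))).getD x.toNat [] = List.replicate 5 0 := by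
    rw [List.getD_eq_getElem _ _ (by simp; omega)]
    exact List.getElem_replicate _
  rw [e1, List.getD_eq_getElem _ _ (by simp; omega)]
  exact List.getElem_replicate _

-- running hypotheses while A processes the popped cell (x, y) at distance d
def pvRun (p : List (List String)) (s : Int × Int) (x y d : Int)
    (σ : List (Int × Int) × List (List Int) × List (List Int)) : Prop :=
  pvSh5 σ.2.1 ∧ pvSh5 σ.2.2 ∧ pvVisInv p s σ.2.1 ∧ pvInbP s ∧
    pvG σ.2.1 s.1 s.2 ≠ 0 ∧ pvInbP (x, y) ∧ pvG σ.2.1 x y ≠ 0 ∧ pvG σ.2.2 x y = d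

-- what one ok-step (and, composed, a run of ok-steps over ns) does to the state
def pvOk (p : List (List String)) (x y d : Int) (ns : List (Int × Int))
    (σ σ' : List (Int × Int) × List (List Int) × List (List Int))
    (new : List (Int × Int)) : Prop :=
  σ'.1 = σ.1 ++ new ∧
  (∀ c ∈ new, c ∈ ns.map (fun δ : Int × Int => (x + δ.1, y + δ.2)) ∧ pvInbP c ∧ pvIsO p c ∧
    pvG σ'.2.1 c.1 c.2 ≠ 0 ∧ pvG σ'.2.2 c.1 c.2 = d + 1) ∧
  (∀ c : Int × Int, pvInbP c → pvG σ.2.1 c.1 c.2 ≠ 0 →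
    pvG σ'.2.1 c.1 c.2 ≠ 0 ∧ pvG σ'.2.2 c.1 c.2 = pvG σ.2.2 c.1 c.2) ∧
  (∀ c : Int × Int, pvInbP c → pvG σ'.2.1 c.1 c.2 ≠ 0 → pvG σ.2.1 c.1 c.2 ≠ 0 ∨ c ∈ new) ∧
  (∀ δ ∈ ns, pvInbP (x + δ.1, y + δ.2) → pvIsO p (x + δ.1, y + δ.2) →
    pvG σ'.2.1 (x + δ.1) (y + δ.2) ≠ 0) ∧
  pvSh5 σ'.2.1 ∧ pvSh5 σ'.2.2

theorem pvRun_of_Ok (p : List (List String)) (s : Int × Int) (x y d : Int)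
    (ns : List (Int × Int)) (σ σ' : List (Int × Int) × List (List Int) × List (List Int))
    (new : List (Int × Int)) (hR : pvRun p s x y d σ) (hO : pvOk p x y d ns σ σ' new) :
    pvRun p s x y d σ' := by
  obtain ⟨hsh1, hsh2, hVI, hsin, hsv, hxyin, hxyv, hd⟩ := hR
  obtain ⟨hq, hnew, hgrow, hback, hcov, hsh1', hsh2'⟩ := hO
  refine ⟨hsh1', hsh2', ?_, hsin, (hgrow s hsin hsv).1, hxyin, (hgrow (x, y) hxyin hxyv).1, ?_⟩
  · intro c hc hv
    rcases hback c hc hv with h | h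
    · exact hVI c hc h
    · exact Or.inr (hnew c h).2.2.1
  · rw [(hgrow (x, y) hxyin hxyv).2, hd]

theorem pvOk_trans (p : List (List String)) (x y d : Int)
    (ns1 ns2 : List (Int × Int)) (σ σ1 σ2 : List (Int × Int) × List (List Int) × List (List Int))
    (new1 new2 : List (Int × Int))
    (h1 : pvOk p x y d ns1 σ σ1 new1) (h2 : pvOk p x y d ns2 σ1 σ2 new2) :
    pvOk p x y d (ns1 ++ ns2) σ σ2 (new1 ++ new2) := by
  obtain ⟨hq1, hnew1, hgrow1, hback1, hcov1, hshv1, hshd1⟩ := h1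
  obtain ⟨hq2, hnew2, hgrow2, hback2, hcov2, hshv2, hshd2⟩ := h2
  refine ⟨by rw [hq2, hq1, List.append_assoc], ?_, ?_, ?_, ?_, hshv2, hshd2⟩
  · intro c hc
    rcases List.mem_append.mp hc with h | h
    · obtain ⟨hm, hin, hO, hv, hdist⟩ := hnew1 c h
      exact ⟨by simp only [List.map_append, List.mem_append]; exact Or.inl hm, hin, hO,
        (hgrow2 c hin hv).1, by rw [(hgrow2 c hin hv).2, hdist]⟩
    · obtain ⟨hm, hin, hO, hv, hdist⟩ := hnew2 c h
      exact ⟨by simp only [List.map_append, List.mem_append]; exact Or.inr hm, hin, hO, hv, hdist⟩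
  · intro c hc hv
    obtain ⟨hv1, hd1⟩ := hgrow1 c hc hv
    obtain ⟨hv2, hd2⟩ := hgrow2 c hc hv1
    exact ⟨hv2, by rw [hd2, hd1]⟩
  · intro c hc hv
    rcases hback2 c hc hv with h | h
    · rcases hback1 c hc h with h' | h'
      · exact Or.inl h'
      · exact Or.inr (List.mem_append.mpr (Or.inl h'))
    · exact Or.inr (List.mem_append.mpr (Or.inr h))
  · intro δ hδ hin hO
    rcases List.mem_append.mp hδ with h | h
    · exact (hgrow2 _ hin (hcov1 δ h hin hO)).1
    · exact hcov2 δ h hin hO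

-- one step of the inner loop: the 'return 0' case
theorem pvStepA_hit (p : List (List String)) (s : Int × Int) (x y d : Int)
    (σ : List (Int × Int) × List (List Int) × List (List Int)) (δ : Int × Int)
    (hR : pvRun p s x y d σ) (hd : d ≤ 1)
    (hin : pvInbP (x + δ.1, y + δ.2)) (hP : pvIsP p (x + δ.1, y + δ.2))
    (hns : (x + δ.1, y + δ.2) ≠ s) :
    pvStepA p x y σ δ = .error 0 := by
  obtain ⟨hsh1, hsh2, hVI, hsin, hsv, hxyin, hxyv, hdd⟩ := hR
  obtain ⟨hin1, hin2, hin3, hin4⟩ := hin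
  have hvis0 : pvG σ.2.1 (x + δ.1) (y + δ.2) = 0 := by
    by_contra hne
    rcases hVI (x + δ.1, y + δ.2) ⟨hin1, hin2, hin3, hin4⟩ hne with h | h
    · exact hns h
    · exact pvNotPO p _ hP h
  have hnO : ¬ pvCell p (x + δ.1) (y + δ.2) = some "O" := pvNotPO p _ hP
  simp only [pvStepA]
  rw [if_pos ⟨hin1, hin2, hin3, hin4, hvis0⟩, if_neg hnO, if_pos ⟨hP, by rw [hdd]; exact hd⟩]

-- one step of the inner loop: the ok case
theorem pvStepA_ok (p : List (List String)) (s : Int × Int) (x y d : Int)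
    (σ : List (Int × Int) × List (List Int) × List (List Int)) (δ : Int × Int)
    (hR : pvRun p s x y d σ)
    (hmiss : ¬(d ≤ 1 ∧ pvInbP (x + δ.1, y + δ.2) ∧ pvIsP p (x + δ.1, y + δ.2) ∧
      (x + δ.1, y + δ.2) ≠ s)) :
    ∃ σ' new, pvStepA p x y σ δ = .ok σ' ∧ pvOk p x y d [δ] σ σ' new := by
  obtain ⟨hsh1, hsh2, hVI, hsin, hsv, hxyin, hxyv, hdd⟩ := hR
  by_cases hg : (0 ≤ x + δ.1 ∧ x + δ.1 < 5 ∧ 0 ≤ y + δ.2 ∧ y + δ.2 < 5 ∧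
      pvG σ.2.1 (x + δ.1) (y + δ.2) = 0)
  · have hinb : pvInbP (x + δ.1, y + δ.2) := ⟨hg.1, hg.2.1, hg.2.2.1, hg.2.2.2.1⟩
    have hbx : 0 ≤ x + δ.1 ∧ x + δ.1 < 5 := ⟨hg.1, hg.2.1⟩
    have hby : 0 ≤ y + δ.2 ∧ y + δ.2 < 5 := ⟨hg.2.2.1, hg.2.2.2.1⟩
    have hv0 := hg.2.2.2.2
    have hnot_s : (x + δ.1, y + δ.2) ≠ s := by
      intro hns
      rw [← hns] at hsv
      exact hsv hv0
    by_cases hO : pvCell p (x + δ.1) (y + δ.2) = some "O"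
    · have hnP : ¬ pvCell p (x + δ.1) (y + δ.2) = some "P" := by rw [hO]; simp
      refine ⟨(σ.1 ++ [(x + δ.1, y + δ.2)], pvS σ.2.1 (x + δ.1) (y + δ.2) 1,
        pvS σ.2.2 (x + δ.1) (y + δ.2) (pvG σ.2.2 x y + 1)), [(x + δ.1, y + δ.2)], ?_, ?_⟩
      · simp only [pvStepA]
        rw [if_pos hg, if_pos hO, if_neg (by rintro ⟨hP, _⟩; exact hnP hP)]
      · refine ⟨rfl, ?_, ?_, ?_, ?_, pvSh5_pvS _ _ _ _ hsh1 hbx hby, pvSh5_pvS _ _ _ _ hsh2 hbx hby⟩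
        · intro c hc
          rw [List.mem_singleton] at hc
          subst hc
          refine ⟨by simp, hinb, hO, ?_, ?_⟩
          · rw [pvG_pvS_same _ _ _ _ hsh1 hbx hby]; simp
          · rw [pvG_pvS_same _ _ _ _ hsh2 hbx hby, hdd]
        · intro c hc hv
          have hne : (c.1, c.2) ≠ (x + δ.1, y + δ.2) := by
            intro he
            have : pvG σ.2.1 c.1 c.2 = 0 := by
              rw [show c.1 = x + δ.1 from congrArg Prod.fst he,
                show c.2 = y + δ.2 from congrArg Prod.snd he]
              exact hv0
            exact hv this
          obtain ⟨hc1, hc2, hc3, hc4⟩ := hc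
          constructor
          · rw [pvG_pvS_ne _ _ _ _ _ _ hsh1 hbx hby ⟨hc1, hc2⟩ ⟨hc3, hc4⟩ hne]
            exact hv
          · rw [pvG_pvS_ne _ _ _ _ _ _ hsh2 hbx hby ⟨hc1, hc2⟩ ⟨hc3, hc4⟩ hne]
        · intro c hc hv
          obtain ⟨hc1, hc2, hc3, hc4⟩ := hc
          by_cases he : (c.1, c.2) = (x + δ.1, y + δ.2)
          · right
            rw [List.mem_singleton, ← he]
          · left
            rw [pvG_pvS_ne _ _ _ _ _ _ hsh1 hbx hby ⟨hc1, hc2⟩ ⟨hc3, hc4⟩ he] at hv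
            exact hv
        · intro δ' hδ' hin' hO'
          rw [List.mem_singleton] at hδ'
          subst hδ'
          rw [pvG_pvS_same _ _ _ _ hsh1 hbx hby]
          simp
    · have hnP : ¬(pvCell p (x + δ.1) (y + δ.2) = some "P" ∧ pvG σ.2.2 x y ≤ 1) := by
        rintro ⟨hP, hle⟩
        rw [hdd] at hle
        exact hmiss ⟨hle, hinb, hP, hnot_s⟩
      refine ⟨σ, [], ?_, ?_⟩
      · simp only [pvStepA]
        rw [if_pos hg, if_neg hO, if_neg hnP]
      · refine ⟨by simp, by simp, fun c _ hv => ⟨hv, rfl⟩, fun c _ hv => Or.inl hv, ?_,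
          hsh1, hsh2⟩
        intro δ' hδ' hin' hO'
        rw [List.mem_singleton] at hδ'
        subst hδ'
        exact absurd hO' hO
  · refine ⟨σ, [], ?_, ?_⟩
    · simp only [pvStepA]
      rw [if_neg hg]
    · refine ⟨by simp, by simp, fun c _ hv => ⟨hv, rfl⟩, fun c _ hv => Or.inl hv, ?_, hsh1, hsh2⟩
      intro δ' hδ' hin' hO'
      rw [List.mem_singleton] at hδ'
      subst hδ'
      obtain ⟨h1, h2, h3, h4⟩ := hin'
      intro hv0
      exact hg ⟨h1, h2, h3, h4, hv0⟩

-- a run of the inner loop over ns (foldlM): 'return 0' happens exactly on a fresh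
-- in-bounds 'P' neighbour at dist ≤ 1
theorem pvFold_spec (p : List (List String)) (s : Int × Int) (x y d : Int)
    (ns : List (Int × Int))
    (σ : List (Int × Int) × List (List Int) × List (List Int)) (hR : pvRun p s x y d σ) :
    ((d ≤ 1 ∧ ∃ δ ∈ ns, pvInbP (x + δ.1, y + δ.2) ∧ pvIsP p (x + δ.1, y + δ.2) ∧
        (x + δ.1, y + δ.2) ≠ s) →
      List.foldlM (pvStepA p x y) σ ns = .error 0) ∧
    (¬(d ≤ 1 ∧ ∃ δ ∈ ns, pvInbP (x + δ.1, y + δ.2) ∧ pvIsP p (x + δ.1, y + δ.2) ∧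
        (x + δ.1, y + δ.2) ≠ s) →
      ∃ σ' new, List.foldlM (pvStepA p x y) σ ns = .ok σ' ∧ pvOk p x y d ns σ σ' new) := by
  induction ns generalizing σ with
  | nil =>
    constructor
    · rintro ⟨-, δ, hδ, -⟩
      simp at hδ
    · intro _
      refine ⟨σ, [], by rfl, ?_⟩
      exact ⟨by simp, by simp, fun c _ hv => ⟨hv, rfl⟩, fun c _ hv => Or.inl hv, by simp,
        hR.1, hR.2.1⟩
  | cons δ ns ih =>
    by_cases hδhit : d ≤ 1 ∧ pvInbP (x + δ.1, y + δ.2) ∧ pvIsP p (x + δ.1, y + δ.2) ∧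
        (x + δ.1, y + δ.2) ≠ s
    · have herr := pvStepA_hit p s x y d σ δ hR hδhit.1 hδhit.2.1 hδhit.2.2.1 hδhit.2.2.2
      constructor
      · intro _
        rw [List.foldlM_cons, herr]
        rfl
      · intro hmiss
        exact absurd ⟨hδhit.1, δ, List.mem_cons_self, hδhit.2⟩ hmiss
    · obtain ⟨σ1, new1, hok, hOk1⟩ := pvStepA_ok p s x y d σ δ hR hδhit
      have hR1 := pvRun_of_Ok p s x y d [δ] σ σ1 new1 hR hOk1
      obtain ⟨ihE, ihO⟩ := ih σ1 hR1
      constructor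
      · rintro ⟨hd1, δ', hδ', hh⟩
        rcases List.mem_cons.mp hδ' with heq | hmem
        · subst heq
          exact absurd ⟨hd1, hh⟩ hδhit
        · rw [List.foldlM_cons, hok]
          simp only [bind, Except.bind]
          exact ihE ⟨hd1, δ', hmem, hh⟩
      · intro hmiss
        have hmiss' : ¬(d ≤ 1 ∧ ∃ δ' ∈ ns, pvInbP (x + δ'.1, y + δ'.2) ∧
            pvIsP p (x + δ'.1, y + δ'.2) ∧ (x + δ'.1, y + δ'.2) ≠ s) := by
          rintro ⟨hd1, δ', hm, hh⟩
          exact hmiss ⟨hd1, δ', List.mem_cons_of_mem _ hm, hh⟩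
        obtain ⟨σ2, new2, hf2, hOk2⟩ := ihO hmiss'
        refine ⟨σ2, new1 ++ new2, ?_, ?_⟩
        · rw [List.foldlM_cons, hok]
          simp only [bind, Except.bind]
          exact hf2
        · have := pvOk_trans p x y d [δ] ns σ σ1 σ2 new1 new2 hOk1 hOk2
          simpa using this

theorem pvHit_iff_nbrs (p : List (List String)) (s : Int × Int) (x y : Int) :
    pvHit p s (x, y) ↔ ∃ δ ∈ pvNbrs, pvInbP (x + δ.1, y + δ.2) ∧
      pvIsP p (x + δ.1, y + δ.2) ∧ (x + δ.1, y + δ.2) ≠ s := by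
  unfold pvHit
  constructor
  · rintro ⟨n, hmem, h1, h2, h3⟩
    obtain ⟨δ, hδ, rfl⟩ := (pvMem_sides x y n).mp hmem
    exact ⟨δ, hδ, h1, h2, h3⟩
  · rintro ⟨δ, hδ, h1, h2, h3⟩
    exact ⟨(x + δ.1, y + δ.2), (pvMem_sides x y _).mpr ⟨δ, hδ, rfl⟩, h1, h2, h3⟩

-- the queue invariant of A's while-loop after the start cell has been processed
def pvLInv (p : List (List String)) (s : Int × Int) (deq : List (Int × Int))
    (vis dist : List (List Int)) : Prop :=
  pvSh5 vis ∧ pvSh5 dist ∧ pvVisInv p s vis ∧ pvInbP s ∧ pvG vis s.1 s.2 ≠ 0 ∧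
    ∀ c ∈ deq, pvInbP c ∧ pvG vis c.1 c.2 ≠ 0 ∧ 1 ≤ pvG dist c.1 c.2

-- the rest of the BFS returns 0 exactly on a queued dist-1 cell with a fresh 'P' neighbour
theorem pvLoop_iff (p : List (List String)) (s : Int × Int) :
    ∀ (n : Nat) (deq : List (Int × Int)) (vis dist : List (List Int)),
      deq.length + pvZeros vis ≤ n → pvLInv p s deq vis dist →
      (bfsLoop p deq vis dist = some 0 ↔
        ∃ c ∈ deq, pvG dist c.1 c.2 ≤ 1 ∧ pvHit p s c) := by
  intro n
  induction n using Nat.strong_induction_on with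
  | _ n ih =>
    intro deq vis dist hn hInv
    obtain ⟨hshv, hshd, hVI, hsin, hsv, hq⟩ := hInv
    match deq with
    | [] => simp [bfsLoop]
    | (x, y) :: rest =>
      obtain ⟨hxyin, hxyv, hxyd⟩ := hq (x, y) List.mem_cons_self
      have hR : pvRun p s x y (pvG dist x y) (rest, vis, dist) :=
        ⟨hshv, hshd, hVI, hsin, hsv, hxyin, hxyv, rfl⟩
      obtain ⟨hE, hO⟩ := pvFold_spec p s x y (pvG dist x y) pvNbrs (rest, vis, dist) hR
      by_cases hhit : pvG dist x y ≤ 1 ∧ ∃ δ ∈ pvNbrs, pvInbP (x + δ.1, y + δ.2) ∧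
          pvIsP p (x + δ.1, y + δ.2) ∧ (x + δ.1, y + δ.2) ≠ s
      · have herr := hE hhit
        rw [bfsLoop]
        split
        · next r heq =>
          rw [herr] at heq
          have hr0 : r = 0 := by
            injection heq with h
            exact h.symm
          constructor
          · intro _
            exact ⟨(x, y), List.mem_cons_self, hhit.1, (pvHit_iff_nbrs p s x y).mpr hhit.2⟩
          · intro _
            rw [hr0]
        · next deq' vis' dist' heq =>
          rw [herr] at heq
          exact absurd heq (by simp)
      · obtain ⟨σ', new, hfold, hOk⟩ := hO hhit
        have hd1 : 1 ≤ pvG dist x y := hxyd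
        have hR' := pvRun_of_Ok p s x y (pvG dist x y) pvNbrs _ _ _ hR hOk
        obtain ⟨hq', hnew, hgrow, hback, hcov, hshv', hshd'⟩ := hOk
        rw [bfsLoop]
        split
        · next r heq =>
          rw [hfold] at heq
          exact absurd heq (by simp)
        · next deq' vis' dist' heq =>
          rw [hfold] at heq
          injection heq with heq
          subst heq
          dsimp only at hq' hnew hgrow hback hcov hshv' hshd' hR' ⊢
          have hmeas : deq'.length + pvZeros vis' < n := by
            have hm := pvFoldA_meas p x y pvNbrs (rest, vis, dist) _ hfold
            simp only [List.length_cons] at hn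
            simp only at hm
            omega
          have hInv' : pvLInv p s deq' vis' dist' := by
            refine ⟨hshv', hshd', hR'.2.2.1, hsin, hR'.2.2.2.2.1, ?_⟩
            intro c hc
            rw [hq'] at hc
            rcases List.mem_append.mp hc with hc | hc
            · obtain ⟨hcin, hcv, hcd⟩ := hq c (List.mem_cons_of_mem _ hc)
              obtain ⟨hgv, hgd⟩ := hgrow c hcin hcv
              exact ⟨hcin, hgv, by rw [hgd]; exact hcd⟩
            · obtain ⟨-, hcin, -, hcv, hcd⟩ := hnew c hc
              exact ⟨hcin, hcv, by rw [hcd]; omega⟩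
          rw [ih _ hmeas deq' vis' dist' (by omega) hInv']
          constructor
          · rintro ⟨c, hc, hcd, hchit⟩
            rw [hq'] at hc
            rcases List.mem_append.mp hc with hc | hc
            · obtain ⟨hcin, hcv, -⟩ := hq c (List.mem_cons_of_mem _ hc)
              refine ⟨c, List.mem_cons_of_mem _ hc, ?_, hchit⟩
              rw [← (hgrow c hcin hcv).2]
              exact hcd
            · obtain ⟨-, -, -, -, hcd'⟩ := hnew c hc
              rw [hcd'] at hcd
              omega
          · rintro ⟨c, hc, hcd, hchit⟩
            rcases List.mem_cons.mp hc with rfl | hc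
            · exact absurd ⟨hcd, (pvHit_iff_nbrs p s x y).mp hchit⟩ hhit
            · obtain ⟨hcin, hcv, -⟩ := hq c (List.mem_cons_of_mem _ hc)
              refine ⟨c, by rw [hq']; exact List.mem_append.mpr (Or.inl hc), ?_, hchit⟩
              rw [(hgrow c hcin hcv).2]
              exact hcd

-- the whole BFS from one 'P' start: 0 exactly when B's near-scan from that cell succeeds
theorem pvStart_iff (p : List (List String)) (sx sy : Int)
    (hs : pvInbP (sx, sy)) (_hP : pvIsP p (sx, sy)) :
    (bfsLoop p [(sx, sy)] (pvS pvInit sx sy 1) pvInit = some 0) ↔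
      ((∃ n ∈ pvSides (sx, sy), pvInbP n ∧ pvIsP p n) ∨
       (∃ n ∈ pvSides (sx, sy), pvInbP n ∧ pvIsO p n ∧ pvHit p (sx, sy) n)) := by
  obtain ⟨hs1, hs2, hs3, hs4⟩ := hs
  have hbx : 0 ≤ sx ∧ sx < 5 := ⟨hs1, hs2⟩
  have hby : 0 ≤ sy ∧ sy < 5 := ⟨hs3, hs4⟩
  have hshv0 : pvSh5 (pvS pvInit sx sy 1) := pvSh5_pvS _ _ _ _ pvSh5_init hbx hby
  have hv0s : pvG (pvS pvInit sx sy 1) sx sy = 1 := pvG_pvS_same _ _ _ _ pvSh5_init hbx hby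
  have hv0iff : ∀ c : Int × Int, pvInbP c →
      (pvG (pvS pvInit sx sy 1) c.1 c.2 ≠ 0 → c = (sx, sy)) := by
    intro c hc hv
    by_contra hne
    rw [pvG_pvS_ne _ _ _ _ _ _ pvSh5_init hbx hby ⟨hc.1, hc.2.1⟩ ⟨hc.2.2.1, hc.2.2.2⟩
      (by intro hh; exact hne (by rw [← hh]))] at hv
    exact hv (pvG_init _ _ ⟨hc.1, hc.2.1⟩ ⟨hc.2.2.1, hc.2.2.2⟩)
  have hVI : pvVisInv p (sx, sy) (pvS pvInit sx sy 1) := fun c hc hv => Or.inl (hv0iff c hc hv)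
  have hR : pvRun p (sx, sy) sx sy 0 ([], pvS pvInit sx sy 1, pvInit) :=
    ⟨hshv0, pvSh5_init, hVI, ⟨hs1, hs2, hs3, hs4⟩, by simp only; rw [hv0s]; simp,
      ⟨hs1, hs2, hs3, hs4⟩, by simp only; rw [hv0s]; simp, pvG_init _ _ hbx hby⟩
  obtain ⟨hE, hO⟩ := pvFold_spec p (sx, sy) sx sy 0 pvNbrs ([], pvS pvInit sx sy 1, pvInit) hR
  have hD1 : (∃ n ∈ pvSides (sx, sy), pvInbP n ∧ pvIsP p n) ↔
      (∃ δ ∈ pvNbrs, pvInbP (sx + δ.1, sy + δ.2) ∧ pvIsP p (sx + δ.1, sy + δ.2) ∧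
        (sx + δ.1, sy + δ.2) ≠ (sx, sy)) := by
    rw [← pvHit_iff_nbrs]
    unfold pvHit
    constructor
    · rintro ⟨n, hm, h1, h2⟩
      exact ⟨n, hm, h1, h2, pvSides_ne _ _ hm⟩
    · rintro ⟨n, hm, h1, h2, -⟩
      exact ⟨n, hm, h1, h2⟩
  by_cases hhit : ∃ δ ∈ pvNbrs, pvInbP (sx + δ.1, sy + δ.2) ∧
      pvIsP p (sx + δ.1, sy + δ.2) ∧ (sx + δ.1, sy + δ.2) ≠ (sx, sy)
  · have herr := hE ⟨by norm_num, hhit⟩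
    rw [bfsLoop]
    split
    · next r heq =>
      rw [herr] at heq
      injection heq with heq
      constructor
      · intro _
        exact Or.inl (hD1.mpr hhit)
      · intro _
        rw [← heq]
    · next deq' vis' dist' heq =>
      rw [herr] at heq
      exact absurd heq (by simp)
  · obtain ⟨σ', new, hfold, hOk⟩ := hO (by rintro ⟨-, hh⟩; exact hhit hh)
    have hR' := pvRun_of_Ok p (sx, sy) sx sy 0 pvNbrs _ _ _ hR hOk
    obtain ⟨hq', hnew, hgrow, hback, hcov, hshv', hshd'⟩ := hOk
    rw [bfsLoop]
    split
    · next r heq =>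
      rw [hfold] at heq
      exact absurd heq (by simp)
    · next deq' vis' dist' heq =>
      rw [hfold] at heq
      injection heq with heq
      subst heq
      dsimp only at hq' hnew hgrow hback hcov hshv' hshd' hR' ⊢
      rw [List.nil_append] at hq'
      have hInv' : pvLInv p (sx, sy) deq' vis' dist' := by
        refine ⟨hshv', hshd', hR'.2.2.1, ⟨hs1, hs2, hs3, hs4⟩, hR'.2.2.2.2.1, ?_⟩
        intro c hc
        rw [hq'] at hc
        obtain ⟨-, hcin, -, hcv, hcd⟩ := hnew c hc
        exact ⟨hcin, hcv, by rw [hcd]; norm_num⟩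
      rw [pvLoop_iff p (sx, sy) (deq'.length + pvZeros vis') deq' vis' dist' le_rfl hInv']
      constructor
      · rintro ⟨c, hc, hcd, hchit⟩
        rw [hq'] at hc
        obtain ⟨hmap, hcin, hcO, -, -⟩ := hnew c hc
        right
        obtain ⟨δ, hδ, hceq⟩ := List.mem_map.mp hmap
        refine ⟨c, ?_, hcin, hcO, hchit⟩
        rw [pvMem_sides]
        exact ⟨δ, hδ, hceq.symm⟩
      · rintro (⟨n, hm, h1, h2⟩ | ⟨n, hm, h1, h2, h3⟩)
        · exact absurd (hD1.mp ⟨n, hm, h1, h2⟩) hhit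
        · obtain ⟨δ, hδ, hneq⟩ := (pvMem_sides sx sy n).mp hm
          have hvn : pvG vis' n.1 n.2 ≠ 0 := by
            rw [hneq]
            exact hcov δ hδ (by rw [← hneq]; exact h1) (by rw [← hneq]; exact h2)
          rcases hback n h1 hvn with hv | hv
          · exact absurd (hv0iff n h1 hv) (pvSides_ne _ _ hm)
          · obtain ⟨-, -, -, -, hcd⟩ := hnew n hv
            refine ⟨n, by rw [hq']; exact hv, by rw [hcd]; norm_num, h3⟩

theorem pvStepA_err0 (p : List (List String)) (x y : Int)
    (σ : List (Int × Int) × List (List Int) × List (List Int)) (δ : Int × Int) (r : Int)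
    (h : pvStepA p x y σ δ = .error r) : r = 0 := by
  simp only [pvStepA] at h
  split_ifs at h
  all_goals cases h
  all_goals rfl

theorem pvFold_err0 (p : List (List String)) (x y : Int) (ns : List (Int × Int))
    (σ : List (Int × Int) × List (List Int) × List (List Int)) (r : Int)
    (h : List.foldlM (pvStepA p x y) σ ns = .error r) : r = 0 := by
  induction ns generalizing σ with
  | nil => simp only [List.foldlM_nil, pure, Except.pure] at h; cases h
  | cons δ ns ih =>
    rw [List.foldlM_cons] at h
    cases hs : pvStepA p x y σ δ with
    | error e =>
      rw [hs] at h
      simp only [bind, Except.bind] at h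
      injection h with h
      subst h
      exact pvStepA_err0 p x y σ δ _ hs
    | ok σ1 =>
      rw [hs] at h
      simp only [bind, Except.bind] at h
      exact ih σ1 h

theorem bfsLoop_res (p : List (List String)) :
    ∀ (n : Nat) (deq : List (Int × Int)) (vis dist : List (List Int)),
      deq.length + pvZeros vis ≤ n →
      bfsLoop p deq vis dist = none ∨ bfsLoop p deq vis dist = some 0 := by
  intro n
  induction n using Nat.strong_induction_on with
  | _ n ih =>
    intro deq vis dist hn
    match deq with
    | [] => left; simp [bfsLoop]
    | (x, y) :: rest =>
      rw [bfsLoop]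
      split
      · next r heq =>
        right
        rw [pvFold_err0 p x y pvNbrs _ r heq]
      · next deq' vis' dist' heq =>
        have hm := pvFoldA_meas p x y pvNbrs (rest, vis, dist) _ heq
        simp only [List.length_cons] at hn
        simp only at hm
        exact ih (deq'.length + pvZeros vis') (by omega) deq' vis' dist' le_rfl

theorem pvRunStarts_zero (p : List (List String)) (l : List (Int × Int))
    (h : ∃ c ∈ l, bfsLoop p [c] (pvS pvInit c.1 c.2 1) pvInit = some 0) :
    pvRunStarts p l = 0 := by
  induction l with
  | nil => simp at h
  | cons c rest ih =>
    obtain ⟨c', hc', hl⟩ := h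
    rcases List.mem_cons.mp hc' with rfl | hmem
    · simp only [pvRunStarts]
      rw [hl]
    · rcases bfsLoop_res p ([c].length + pvZeros (pvS pvInit c.1 c.2 1)) [c] _ pvInit le_rfl
        with hres | hres
      · simp only [pvRunStarts]
        rw [hres]
        exact ih ⟨c', hmem, hl⟩
      · simp only [pvRunStarts]
        rw [hres]

theorem pvRunStarts_one (p : List (List String)) (l : List (Int × Int))
    (h : ¬ ∃ c ∈ l, bfsLoop p [c] (pvS pvInit c.1 c.2 1) pvInit = some 0) :
    pvRunStarts p l = 1 := by
  induction l with
  | nil => rfl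
  | cons c rest ih =>
    rcases bfsLoop_res p ([c].length + pvZeros (pvS pvInit c.1 c.2 1)) [c] _ pvInit le_rfl
      with hres | hres
    · simp only [pvRunStarts]
      rw [hres]
      exact ih (fun ⟨c', hm, hl⟩ => h ⟨c', List.mem_cons_of_mem _ hm, hl⟩)
    · exact absurd ⟨c, List.mem_cons_self, hres⟩ h

theorem pvMemInner (p : List (List String)) (i : Int) (l : List Int)
    (acc : List (Int × Int)) (c : Int × Int) :
    c ∈ l.foldl (fun acc2 j => if pvCell p i j = some "P" then acc2 ++ [(i, j)] else acc2) acc ↔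
      c ∈ acc ∨ ∃ j ∈ l, pvCell p i j = some "P" ∧ c = (i, j) := by
  induction l generalizing acc with
  | nil => simp
  | cons j l ih =>
    rw [List.foldl_cons]
    by_cases hc : pvCell p i j = some "P"
    · rw [if_pos hc, ih]
      simp only [List.mem_append, List.mem_cons, List.not_mem_nil, or_false]
      constructor
      · rintro ((h | h) | ⟨j', hj', h1, h2⟩)
        · exact Or.inl h
        · exact Or.inr ⟨j, Or.inl rfl, hc, h⟩
        · exact Or.inr ⟨j', Or.inr hj', h1, h2⟩
      · rintro (h | ⟨j', (rfl | hj'), h1, h2⟩)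
        · exact Or.inl (Or.inl h)
        · exact Or.inl (Or.inr h2)
        · exact Or.inr ⟨j', hj', h1, h2⟩
    · rw [if_neg hc, ih]
      constructor
      · rintro (h | ⟨j', hj', h1, h2⟩)
        · exact Or.inl h
        · exact Or.inr ⟨j', List.mem_cons_of_mem _ hj', h1, h2⟩
      · rintro (h | ⟨j', hj', h1, h2⟩)
        · exact Or.inl h
        · rcases List.mem_cons.mp hj' with rfl | hj''
          · exact absurd h1 hc
          · exact Or.inr ⟨j', hj'', h1, h2⟩

theorem pvMemStarts (p : List (List String)) (c : Int × Int) :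
    c ∈ pvStarts p ↔ pvInbP c ∧ pvIsP p c := by
  unfold pvStarts
  have houter : ∀ (li : List Int) (acc : List (Int × Int)),
      c ∈ li.foldl (fun acc i => (PySem.List.pyRange 0 5 1).foldl
        (fun acc2 j => if pvCell p i j = some "P" then acc2 ++ [(i, j)] else acc2) acc) acc ↔
      c ∈ acc ∨ ∃ i ∈ li, ∃ j ∈ PySem.List.pyRange 0 5 1,
        pvCell p i j = some "P" ∧ c = (i, j) := by
    intro li
    induction li with
    | nil => simp
    | cons i li ih =>
      intro acc
      rw [List.foldl_cons, ih, pvMemInner]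
      constructor
      · rintro ((h | ⟨j, hj, h1, h2⟩) | ⟨i', hi', hrest⟩)
        · exact Or.inl h
        · exact Or.inr ⟨i, List.mem_cons_self, j, hj, h1, h2⟩
        · exact Or.inr ⟨i', List.mem_cons_of_mem _ hi', hrest⟩
      · rintro (h | ⟨i', hi', j, hj, h1, h2⟩)
        · exact Or.inl (Or.inl h)
        · rcases List.mem_cons.mp hi' with rfl | hi''
          · exact Or.inl (Or.inr ⟨j, hj, h1, h2⟩)
          · exact Or.inr ⟨i', hi'', j, hj, h1, h2⟩
  rw [houter]
  simp only [List.not_mem_nil, false_or, PySem.List.mem_pyRange_one]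
  constructor
  · rintro ⟨i, ⟨hi0, hi5⟩, j, ⟨hj0, hj5⟩, h1, rfl⟩
    exact ⟨⟨hi0, hi5, hj0, hj5⟩, h1⟩
  · rintro ⟨⟨h1, h2, h3, h4⟩, hP⟩
    exact ⟨c.1, ⟨h1, h2⟩, c.2, ⟨h3, h4⟩, hP, rfl⟩

theorem pvNear_iff (p : List (List String)) (i j : Int) :
    pvNear p i j = true ↔
      ((∃ n ∈ pvSides (i, j), pvInbP n ∧ pvIsP p n) ∨
       (∃ n ∈ pvSides (i, j), pvInbP n ∧ pvIsO p n ∧ pvHit p (i, j) n)) := by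
  unfold pvNear pvInb pvHit pvIsP pvIsO pvInbP
  simp only [List.any_eq_true, Bool.and_eq_true, Bool.or_eq_true, decide_eq_true_eq]
  constructor
  · rintro ⟨n, hn, hinb, (hP | ⟨hO, m, hm, ⟨hminb, hmne⟩, hmP⟩)⟩
    · exact Or.inl ⟨n, hn, hinb, hP⟩
    · exact Or.inr ⟨n, hn, hinb, hO, m, hm, hminb, hmP, hmne⟩
  · rintro (⟨n, hn, hinb, hP⟩ | ⟨n, hn, hinb, hO, m, hm, hminb, hmP, hmne⟩)
    · exact ⟨n, hn, hinb, Or.inl hP⟩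
    · exact ⟨n, hn, hinb, Or.inr ⟨hO, m, hm, ⟨hminb, hmne⟩, hmP⟩⟩

theorem pvBfs_eq (p : List (List String)) : bfs p = bfs_alt p := by
  have hcond : (∃ c ∈ pvStarts p, bfsLoop p [c] (pvS pvInit c.1 c.2 1) pvInit = some 0) ↔
      ((PySem.List.pyRange 0 5 1).any (fun i => (PySem.List.pyRange 0 5 1).any (fun j =>
        decide (pvCell p i j = some "P") && pvNear p i j)) = true) := by
    simp only [List.any_eq_true, Bool.and_eq_true, decide_eq_true_eq,
      PySem.List.mem_pyRange_one]
    constructor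
    · rintro ⟨c, hc, hl⟩
      obtain ⟨⟨h1, h2, h3, h4⟩, hP⟩ := (pvMemStarts p c).mp hc
      refine ⟨c.1, ⟨h1, h2⟩, c.2, ⟨h3, h4⟩, hP, ?_⟩
      rw [pvNear_iff]
      rw [show ((c.1, c.2) : Int × Int) = c from rfl]
      exact (pvStart_iff p c.1 c.2 ⟨h1, h2, h3, h4⟩ hP).mp (by
        rw [show ((c.1, c.2) : Int × Int) = c from rfl]
        exact hl)
    · rintro ⟨i, ⟨hi0, hi5⟩, j, ⟨hj0, hj5⟩, hP, hnear⟩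
      refine ⟨(i, j), (pvMemStarts p (i, j)).mpr ⟨⟨hi0, hi5, hj0, hj5⟩, hP⟩, ?_⟩
      rw [pvStart_iff p i j ⟨hi0, hi5, hj0, hj5⟩ hP]
      rw [pvNear_iff] at hnear
      exact hnear
  unfold bfs bfs_alt
  by_cases hC : ∃ c ∈ pvStarts p, bfsLoop p [c] (pvS pvInit c.1 c.2 1) pvInit = some 0
  · rw [pvRunStarts_zero p _ hC, if_pos (hcond.mp hC)]
  · rw [pvRunStarts_one p _ hC, if_neg (fun hh => hC (hcond.mpr hh))]

-- ===== VERDICT (by name: the statement is the Claim_ definition above) =====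
theorem bfs_spec : Claim_equal_bfs := by
  intro p _ _
  unfold Spec_bfs
  exact pvBfs_eq p
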